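-- pv_equiv track=rewrite | github.com/jstrength/aoc | 2024/day9/part2/main.py | find_next_free_space
-- ===== SOURCE A (Python) =====
-- def find_next_free_space(start, memory):
--     p1 = -1
--     for i in range(start, len(memory)):
--         if memory[i] == '.':
--             if p1 == -1:
--                 p1 = i
--         elif p1 != -1:
--             return (p1, i-1)
--     return None
-- ===== SOURCE B (Python) =====
-- def find_next_free_space(start, memory):
--     # Run-length encode the scanned region into maximal runs [free, begin, end],
--     # then return the first free run that is followed by a further run.
--     runs = []
--     for i in range(start, len(memory)):
--         free = memory[i] == '.'
--         if runs and runs[-1][0] == free: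
--             runs[-1][2] = i
--         else:
--             runs.append([free, i, i])
--     for k in range(len(runs) - 1):
--         if runs[k][0]:
--             return (runs[k][1], runs[k][2])
--     return None
-- ===== Notes on version B (the rewrite author's own statement) =====
-- stated objective: alternative
-- what changed: B run-length encodes the scanned region into a list of maximal runs [free, begin, end] and then selects the first free run that is followed by another run, instead of A's single pass with a p1=-1 sentinel flag and a mid-loop return.
-- outside the precondition, e.g. on find_next_free_space(-1, ['x', '.']): A returns None, B returns (-1, -1)
import Mathlib
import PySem

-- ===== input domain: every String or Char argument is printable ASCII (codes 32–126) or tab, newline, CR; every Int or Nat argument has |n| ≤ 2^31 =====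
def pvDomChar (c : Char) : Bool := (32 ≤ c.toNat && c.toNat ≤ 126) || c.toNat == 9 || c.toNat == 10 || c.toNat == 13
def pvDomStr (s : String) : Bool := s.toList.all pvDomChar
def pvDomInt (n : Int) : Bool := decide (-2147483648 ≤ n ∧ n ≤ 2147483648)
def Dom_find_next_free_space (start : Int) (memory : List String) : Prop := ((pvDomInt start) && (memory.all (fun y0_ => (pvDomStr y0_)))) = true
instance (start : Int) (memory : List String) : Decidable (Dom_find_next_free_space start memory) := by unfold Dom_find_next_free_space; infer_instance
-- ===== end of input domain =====

-- B run-length encodes the scanned region into maximal runs and selects the first free run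
-- followed by another run, instead of A's p1=-1 sentinel state machine; equal return values
-- on all nonnegative starts (Pre_ restricts to those).

-- ===== PORT A =====
def aLoop (memory : List String) (p1 : Int) : List Int → Option (Int × Int)
  | [] => none
  | i :: rest =>
    match PySem.List.pyGet? memory i with
    | none => none
    | some c =>
      if c = "." then
        (if p1 = -1 then aLoop memory i rest else aLoop memory p1 rest)
      else if p1 ≠ -1 then some (p1, i - 1)
      else aLoop memory p1 rest

def find_next_free_space (start : Int) (memory : List String) : Option (Int × Int) :=
  aLoop memory (-1) (PySem.List.pyRange start (memory.length : Int) 1)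

-- ===== PORT B =====
-- first loop of Source B: build the run-length encoding (runs[-1] is the last run; a failed read = IndexError = none)
def buildRuns (memory : List String) : List Int → List (Bool × Int × Int) → Option (List (Bool × Int × Int))
  | [], runs => some runs
  | i :: rest, runs =>
    match PySem.List.pyGet? memory i with
    | none => none
    | some c =>
      match runs.getLast? with
      | some r =>
        if r.1 = (c == ".") then buildRuns memory rest (runs.dropLast ++ [(r.1, r.2.1, i)])
        else buildRuns memory rest (runs ++ [((c == "."), i, i)])
      | none => buildRuns memory rest (runs ++ [((c == "."), i, i)])

-- second loop of Source B: k ranges over all runs but the last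
def pickRun : List (Bool × Int × Int) → Option (Int × Int)
  | [] => none
  | [_] => none
  | r :: rest => if r.1 then some (r.2.1, r.2.2) else pickRun rest

def find_next_free_space_alt (start : Int) (memory : List String) : Option (Int × Int) :=
  match buildRuns memory (PySem.List.pyRange start (memory.length : Int) 1) [] with
  | none => none
  | some runs => pickRun runs

-- ===== PRECONDITION & SPEC =====
-- Pre_ restricts to the function's natural domain of nonnegative scan positions: a negative start
-- either raises IndexError (start < -len) or only 'works' through Python's accidental negative-index
-- wraparound, where A's p1=-1 sentinel collides with the legal index -1 — a corner outside intended use.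
def Pre_find_next_free_space (start : Int) (memory : List String) : Prop := 0 ≤ start

instance (start : Int) (memory : List String) : Decidable (Pre_find_next_free_space start memory) := by
  unfold Pre_find_next_free_space; infer_instance

def pvWitness_find_next_free_space : Int × List String := (0, ["x", ".", "x"])

def Spec_find_next_free_space (start : Int) (memory : List String) (out : Option (Int × Int)) : Prop := out = find_next_free_space_alt start memory
instance (start : Int) (memory : List String) (out : Option (Int × Int)) : Decidable (Spec_find_next_free_space start memory out) := by unfold Spec_find_next_free_space; infer_instance

-- ===== CLAIM (what is proved, stated in full; the proofs are below) =====
def Claim_equal_find_next_free_space : Prop := ∀ (start : Int) (memory : List String), Dom_find_next_free_space start memory → Pre_find_next_free_space start memory → Spec_find_next_free_space start memory (find_next_free_space start memory)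

-- ===== LEMMAS AND PROOFS =====

theorem aLoop_cons (memory : List String) (p1 i : Int) (rest : List Int) :
    aLoop memory p1 (i :: rest) =
      match PySem.List.pyGet? memory i with
      | none => none
      | some c =>
        if c = "." then (if p1 = -1 then aLoop memory i rest else aLoop memory p1 rest)
        else if p1 ≠ -1 then some (p1, i - 1)
        else aLoop memory p1 rest := rfl

theorem buildRuns_cons (memory : List String) (i : Int) (rest : List Int) (runs : List (Bool × Int × Int)) :
    buildRuns memory (i :: rest) runs =
      match PySem.List.pyGet? memory i with
      | none => none
      | some c =>
        match runs.getLast? with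
        | some r =>
          if r.1 = (c == ".") then buildRuns memory rest (runs.dropLast ++ [(r.1, r.2.1, i)])
          else buildRuns memory rest (runs ++ [((c == "."), i, i)])
        | none => buildRuns memory rest (runs ++ [((c == "."), i, i)]) := rfl

theorem pickRun_cons_cons (r s : Bool × Int × Int) (t : List (Bool × Int × Int)) :
    pickRun (r :: s :: t) = if r.1 then some (r.2.1, r.2.2) else pickRun (s :: t) := rfl

-- in-range nonnegative indices always read successfully
theorem pvGet_some {memory : List String} {i : Int}
    (h1 : 0 ≤ i) (h2 : i < (memory.length : Int)) :
    ∃ c, PySem.List.pyGet? memory i = some c := by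
  cases h : PySem.List.pyGet? memory i with
  | some c => exact ⟨c, rfl⟩
  | none =>
    rw [PySem.List.pyGet?_eq_none_iff] at h
    exact absurd (by simp [PySem.Raise.InRange]; omega) h

-- the first run of a two-or-more-run accumulator is never touched again
theorem buildRuns_head_stable (memory : List String) :
    ∀ (is : List Int) (r : Bool × Int × Int) (rs : List (Bool × Int × Int)), rs ≠ [] →
    buildRuns memory is (r :: rs) = (buildRuns memory is rs).map (fun out => r :: out) := by
  intro is
  induction is with
  | nil => intro r rs _; rfl
  | cons i rest ih =>
    intro r rs hne
    obtain ⟨y, ys, rfl⟩ := List.exists_cons_of_ne_nil hne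
    rw [buildRuns_cons, buildRuns_cons]
    cases hg : PySem.List.pyGet? memory i with
    | none => rfl
    | some c =>
      rw [List.getLast?_cons_cons]
      cases hl : (y :: ys).getLast? with
      | none => simp at hl
      | some q =>
        dsimp only
        by_cases hq : q.1 = (c == ".")
        · rw [if_pos hq, if_pos hq]
          have hdrop : (r :: y :: ys).dropLast = r :: (y :: ys).dropLast := rfl
          rw [hdrop, List.cons_append]
          refine ih r _ ?_
          rcases h2 : (y :: ys).dropLast with _ | _ <;> simp
        · rw [if_neg hq, if_neg hq, List.cons_append]
          refine ih r _ ?_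
          simp

-- with all reads in range, building from a nonempty accumulator yields a nonempty run list
theorem buildRuns_some (memory : List String) :
    ∀ (is : List Int) (rs : List (Bool × Int × Int)),
    (∀ i ∈ is, 0 ≤ i ∧ i < (memory.length : Int)) → rs ≠ [] →
    ∃ out, buildRuns memory is rs = some out ∧ out ≠ [] := by
  intro is
  induction is with
  | nil => intro rs _ hne; exact ⟨rs, rfl, hne⟩
  | cons i rest ih =>
    intro rs hin hne
    obtain ⟨hi1, hi2⟩ := hin i List.mem_cons_self
    obtain ⟨c, hg⟩ := pvGet_some hi1 hi2
    have hin' : ∀ j ∈ rest, 0 ≤ j ∧ j < (memory.length : Int) :=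
      fun j hj => hin j (List.mem_cons_of_mem _ hj)
    rw [buildRuns_cons, hg]
    cases hl : rs.getLast? with
    | none => exact absurd (List.getLast?_eq_none_iff.mp hl) hne
    | some r =>
      dsimp only
      by_cases hq : r.1 = (c == ".")
      · rw [if_pos hq]
        refine ih _ hin' ?_
        simp
      · rw [if_neg hq]
        refine ih _ hin' ?_
        simp

-- state S1 (p1 = p set, current free run ends at e = s-1): A's loop vs B's pipeline
theorem aLoop_eq_S1 (memory : List String) :
    ∀ (k : Nat) (s p e : Int), 0 ≤ p → 0 ≤ s → e = s - 1 →
    ((memory.length : Int) - s).toNat ≤ k →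
    aLoop memory p (PySem.List.pyRange s (memory.length : Int) 1) =
      (match buildRuns memory (PySem.List.pyRange s (memory.length : Int) 1) [(true, p, e)] with
       | none => none
       | some rs => pickRun rs) := by
  intro k
  induction k with
  | zero =>
    intro s p e _ _ _ hk
    rw [PySem.List.pyRange_one_eq_nil (by omega)]
    rfl
  | succ k ih =>
    intro s p e hp hs he hk
    by_cases hsl : (memory.length : Int) ≤ s
    · rw [PySem.List.pyRange_one_eq_nil hsl]; rfl
    · push_neg at hsl
      obtain ⟨c, hg⟩ := pvGet_some hs hsl
      rw [PySem.List.pyRange_one_cons hsl, aLoop_cons, buildRuns_cons, hg]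
      dsimp only
      by_cases hc : c = "."
      · -- merge into the free run; A keeps scanning with p1 = p ≠ -1
        rw [if_pos hc, if_neg (by omega : ¬ p = -1)]
        rw [show ([(true, p, e)] : List (Bool × Int × Int)).getLast? = some (true, p, e) from rfl]
        dsimp only
        rw [if_pos (show ((true, p, e) : Bool × Int × Int).1 = (c == ".") from ((beq_iff_eq).mpr hc).symm)]
        rw [show ([(true, p, e)] : List (Bool × Int × Int)).dropLast ++ [(((true, p, e) : Bool × Int × Int).1, ((true, p, e) : Bool × Int × Int).2.1, s)] = [(true, p, s)] from rfl]
        exact ih (s + 1) p s hp (by omega) (by omega) (by omega)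
      · -- non-free cell: A returns (p, s-1); B appends a new run and later picks (p, e)
        rw [if_neg hc, if_pos (by omega : ¬ p = -1)]
        rw [show ([(true, p, e)] : List (Bool × Int × Int)).getLast? = some (true, p, e) from rfl]
        dsimp only
        rw [if_neg (show ¬ ((true, p, e) : Bool × Int × Int).1 = (c == ".") by
          simp only [beq_eq_false_iff_ne.mpr hc]; simp)]
        rw [show ([(true, p, e)] : List (Bool × Int × Int)) ++ [((c == "."), s, s)]
            = (true, p, e) :: [((c == "."), s, s)] from rfl]
        rw [buildRuns_head_stable memory _ _ _ (by simp)]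
        obtain ⟨out, hout, hne⟩ := buildRuns_some memory (PySem.List.pyRange (s + 1) (memory.length : Int) 1) [((c == "."), s, s)]
          (by intro j hj; rw [PySem.List.mem_pyRange_one] at hj; omega) (by simp)
        rw [hout]
        obtain ⟨o, os, rfl⟩ := List.exists_cons_of_ne_nil hne
        simp only [Option.map_some]
        rw [pickRun_cons_cons]
        simp [he]

-- state S0 with one non-free run accumulated (no '.' seen yet): A's loop vs B's pipeline
theorem aLoop_eq_S0b (memory : List String) :
    ∀ (k : Nat) (s a b : Int), 0 ≤ s →
    ((memory.length : Int) - s).toNat ≤ k →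
    aLoop memory (-1) (PySem.List.pyRange s (memory.length : Int) 1) =
      (match buildRuns memory (PySem.List.pyRange s (memory.length : Int) 1) [(false, a, b)] with
       | none => none
       | some rs => pickRun rs) := by
  intro k
  induction k with
  | zero =>
    intro s a b _ hk
    rw [PySem.List.pyRange_one_eq_nil (by omega)]
    rfl
  | succ k ih =>
    intro s a b hs hk
    by_cases hsl : (memory.length : Int) ≤ s
    · rw [PySem.List.pyRange_one_eq_nil hsl]; rfl
    · push_neg at hsl
      obtain ⟨c, hg⟩ := pvGet_some hs hsl
      rw [PySem.List.pyRange_one_cons hsl, aLoop_cons, buildRuns_cons, hg]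
      rw [show ([(false, a, b)] : List (Bool × Int × Int)).getLast? = some (false, a, b) from rfl]
      dsimp only
      by_cases hc : c = "."
      · -- first '.' seen: A sets p1 = s; B appends a fresh free run
        rw [if_pos hc, if_pos rfl]
        rw [if_neg (show ¬ ((false, a, b) : Bool × Int × Int).1 = (c == ".") by
          simp only [beq_iff_eq.mpr hc]; simp)]
        rw [show ([(false, a, b)] : List (Bool × Int × Int)) ++ [((c == "."), s, s)]
            = (false, a, b) :: [((c == "."), s, s)] from rfl]
        rw [buildRuns_head_stable memory _ _ _ (by simp)]
        obtain ⟨out, hout, hne⟩ := buildRuns_some memory (PySem.List.pyRange (s + 1) (memory.length : Int) 1) [((c == "."), s, s)]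
          (by intro j hj; rw [PySem.List.mem_pyRange_one] at hj; omega) (by simp)
        rw [hout]
        obtain ⟨o, os, rfl⟩ := List.exists_cons_of_ne_nil hne
        simp only [Option.map_some]
        rw [pickRun_cons_cons]
        rw [if_neg (show ¬ ((false, a, b) : Bool × Int × Int).1 = true by simp)]
        have hS1 := aLoop_eq_S1 memory ((memory.length : Int) - (s + 1)).toNat (s + 1) s s
          (by omega) (by omega) (by omega) (le_refl _)
        rw [show [((c == ".") , s, s)] = [(true, s, s)] by rw [beq_iff_eq.mpr hc]] at hout
        rw [hS1, hout]
      · -- another non-free cell: merge; A keeps the sentinel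
        rw [if_neg hc, if_neg (by simp : ¬ (-1 : Int) ≠ -1)]
        rw [if_pos (show ((false, a, b) : Bool × Int × Int).1 = (c == ".")
          from (beq_eq_false_iff_ne.mpr hc).symm)]
        rw [show ([(false, a, b)] : List (Bool × Int × Int)).dropLast ++ [(((false, a, b) : Bool × Int × Int).1, ((false, a, b) : Bool × Int × Int).2.1, s)] = [(false, a, s)] from rfl]
        exact ih (s + 1) a s (by omega) (by omega)

-- ===== VERDICT (by name: the statement is the Claim_ definition above) =====
theorem find_next_free_space_spec : Claim_equal_find_next_free_space := by
  intro start memory hdom hpre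
  unfold Pre_find_next_free_space at hpre
  unfold Spec_find_next_free_space find_next_free_space find_next_free_space_alt
  by_cases hsl : (memory.length : Int) ≤ start
  · rw [PySem.List.pyRange_one_eq_nil hsl]; rfl
  · push_neg at hsl
    obtain ⟨c, hg⟩ := pvGet_some hpre hsl
    rw [PySem.List.pyRange_one_cons hsl, aLoop_cons, buildRuns_cons, hg]
    dsimp only
    rw [List.nil_append]
    by_cases hc : c = "."
    · rw [if_pos hc, if_pos rfl]
      rw [show [((c == ".") , start, start)] = [(true, start, start)] by rw [beq_iff_eq.mpr hc]]
      exact aLoop_eq_S1 memory ((memory.length : Int) - (start + 1)).toNat (start + 1)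
        start start (by omega) (by omega) (by omega) (le_refl _)
    · rw [if_neg hc, if_neg (by simp : ¬ (-1 : Int) ≠ -1)]
      rw [show [((c == ".") , start, start)] = [(false, start, start)] by rw [beq_eq_false_iff_ne.mpr hc]]
      exact aLoop_eq_S0b memory ((memory.length : Int) - (start + 1)).toNat (start + 1)
        start start (by omega) (le_refl _)
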